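-- pv_equiv track=rewrite | github.com/ADAPA360/Akkurat---AtomTN---Quantum-Classical-Cognitive-Hybrid | tn.py | factorize_into_modes
-- ===== SOURCE A (Python) =====
-- from typing import Any, Dict, Iterable, List, Optional, Sequence, Tuple, Union
-- import math
--
-- def get_factors(n: int) -> Tuple[int, int]:
--     """
--     Return integer factors (a, b) such that a*b == n and a is as large as
--     possible while a <= sqrt(n). For primes, returns (1, n).
--     """
--     n = int(n)
--     if n <= 0:
--         return (1, 1)
--     a = int(math.isqrt(n))
--     while a > 0:
--         if n % a == 0:
--             return (a, n // a)
--         a -= 1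
--     return (1, n)
--
-- def factorize_into_modes(n: int, num_modes: int = 2) -> List[int]:
--     """
--     Deterministically factor n into num_modes positive mode sizes.
--
--     This helper is intentionally conservative. It repeatedly extracts near-square
--     factors so that awkward or prime dimensions still produce valid mode lists.
--     """
--     n = int(n)
--     num_modes = int(num_modes)
--     if n <= 0:
--         raise ValueError("n must be positive.")
--     if num_modes <= 0:
--         raise ValueError("num_modes must be positive.")
--     if num_modes == 1:
--         return [n]
--
--     modes: List[int] = []
--     remaining = n
--     slots = num_modes
--     while slots > 1:
--         a, b = get_factors(remaining)
--         # Keep the smaller/near-square factor first and factor the remainder.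
--         modes.append(int(a))
--         remaining = int(b)
--         slots -= 1
--     modes.append(int(remaining))
--
--     # If n is prime and num_modes > 1, this yields many 1s and n. That is valid.
--     if _prod(modes) != n:
--         raise RuntimeError("factorize_into_modes produced invalid factorization.")
--     return modes
--
-- def _prod(ints: Sequence[int]) -> int:
--     p = 1
--     for x in ints:
--         p *= int(x)
--     return int(p)
-- ===== SOURCE B (Python) =====
-- import math
-- from typing import List
--
-- def factorize_into_modes(n: int, num_modes: int = 2) -> List[int]:
--     n = int(n)
--     num_modes = int(num_modes)
--     if n <= 0:
--         raise ValueError("n must be positive.")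
--     if num_modes <= 0:
--         raise ValueError("num_modes must be positive.")
--     # Collect all divisors of n once (every later remainder divides n).
--     divs: List[int] = []
--     for d in range(1, math.isqrt(n) + 1):
--         if n % d == 0:
--             divs.append(d)
--             divs.append(n // d)
--     modes: List[int] = []
--     remaining = n
--     for _ in range(num_modes - 1):
--         a = 1
--         for d in divs:
--             if remaining % d == 0 and d * d <= remaining and d > a:
--                 a = d
--         modes.append(a)
--         remaining //= a
--     modes.append(remaining)
--     return modes
-- ===== Notes on version B (the rewrite author's own statement) =====
-- stated objective: alternative
-- what changed: B collects all divisors of n in a single sqrt(n) pass and serves every mode-extraction step by a running-max scan over that small divisor list, instead of A's fresh descending scan from isqrt(remaining) for each of the num_modes slots.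
import Mathlib
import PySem

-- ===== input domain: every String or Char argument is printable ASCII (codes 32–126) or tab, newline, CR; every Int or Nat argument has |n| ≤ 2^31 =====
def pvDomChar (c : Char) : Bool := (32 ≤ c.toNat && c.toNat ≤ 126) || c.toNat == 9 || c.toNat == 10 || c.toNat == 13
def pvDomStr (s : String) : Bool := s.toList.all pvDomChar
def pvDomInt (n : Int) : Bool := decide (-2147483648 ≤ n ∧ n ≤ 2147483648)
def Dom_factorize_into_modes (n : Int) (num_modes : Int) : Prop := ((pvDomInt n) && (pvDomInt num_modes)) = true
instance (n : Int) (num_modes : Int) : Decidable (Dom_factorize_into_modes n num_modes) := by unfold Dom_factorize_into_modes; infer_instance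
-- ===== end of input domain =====

-- B replaces A's per-mode descending scan from isqrt(remaining) by one divisor collection for n,
-- reused for every mode via a running-max pass (equivalence proved on n ≥ 1, num_modes ≥ 1).

-- ===== PORT A =====
-- get_factors's `while a > 0` loop; the Nat argument is the current value of `a`.
def pvGfLoop (n : Int) : Nat → Int × Int
  | 0 => (1, n)
  | a + 1 =>
      if PySem.Int.mod n ((a : Int) + 1) = 0 then
        ((a : Int) + 1, PySem.Int.floordiv n ((a : Int) + 1))
      else pvGfLoop n a

def get_factors (n : Int) : Int × Int :=
  if n ≤ 0 then (1, 1)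
  else pvGfLoop n (Nat.sqrt n.toNat)  -- math.isqrt(n); Nat.sqrt is exact for n > 0

-- the `while slots > 1` loop; fuel = slots - 1; returns (modes, remaining)
def pvALoop (modes : List Int) (remaining : Int) : Nat → List Int × Int
  | 0 => (modes, remaining)
  | k + 1 =>
      let ab := get_factors remaining
      pvALoop (modes ++ [ab.1]) ab.2 k

def pvProd (ints : List Int) : Int := ints.foldl (fun p x => p * x) 1  -- _prod

def factorize_into_modes (n : Int) (num_modes : Int) : List Int :=
  if n ≤ 0 then []                 -- raise ValueError (outside Pre_)
  else if num_modes ≤ 0 then []    -- raise ValueError (outside Pre_)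
  else if num_modes = 1 then [n]
  else
    let mr := pvALoop [] n (num_modes - 1).toNat
    let modes := mr.1 ++ [mr.2]
    if pvProd modes ≠ n then []    -- raise RuntimeError (proved unreachable under Pre_)
    else modes

-- ===== PORT B =====
-- `for d in range(1, isqrt(n)+1): if n % d == 0: divs += [d, n//d]`
def pvDivs (n : Int) : List Int :=
  (PySem.List.pyRange 1 ((Nat.sqrt n.toNat : Int) + 1) 1).foldl
    (fun divs d =>
      if PySem.Int.mod n d = 0 then divs ++ [d, PySem.Int.floordiv n d] else divs) []

-- inner `a = 1; for d in divs: if …: a = d`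
def pvBest (remaining : Int) (divs : List Int) : Int :=
  divs.foldl
    (fun a d =>
      if PySem.Int.mod remaining d = 0 ∧ d * d ≤ remaining ∧ a < d then d else a) 1

-- `for _ in range(num_modes - 1)` loop
def pvBLoop (divs : List Int) (modes : List Int) (remaining : Int) : Nat → List Int
  | 0 => modes ++ [remaining]
  | k + 1 =>
      let a := pvBest remaining divs
      pvBLoop divs (modes ++ [a]) (PySem.Int.floordiv remaining a) k

def factorize_into_modes_alt (n : Int) (num_modes : Int) : List Int :=
  if n ≤ 0 then []                 -- raise ValueError (outside Pre_)
  else if num_modes ≤ 0 then []    -- raise ValueError (outside Pre_)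
  else pvBLoop (pvDivs n) [] n (num_modes - 1).toNat

-- ===== PRECONDITION & SPEC =====
-- Pre_ excludes exactly the inputs on which A raises ValueError (n ≤ 0 or num_modes ≤ 0).
def Pre_factorize_into_modes (n : Int) (num_modes : Int) : Prop := 1 ≤ n ∧ 1 ≤ num_modes
instance (n : Int) (num_modes : Int) : Decidable (Pre_factorize_into_modes n num_modes) := by
  unfold Pre_factorize_into_modes; infer_instance

def pvWitness_factorize_into_modes : Int × Int := (12, 3)

def Spec_factorize_into_modes (n : Int) (num_modes : Int) (out : List Int) : Prop :=
  out = factorize_into_modes_alt n num_modes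
instance (n : Int) (num_modes : Int) (out : List Int) : Decidable (Spec_factorize_into_modes n num_modes out) := by
  unfold Spec_factorize_into_modes; infer_instance

-- ===== CLAIM (what is proved, stated in full; the proofs are below) =====
def Claim_equal_factorize_into_modes : Prop := ∀ (n : Int) (num_modes : Int), Dom_factorize_into_modes n num_modes → Pre_factorize_into_modes n num_modes → Spec_factorize_into_modes n num_modes (factorize_into_modes n num_modes)

-- ===== LEMMAS AND PROOFS =====

-- A's descending scan returns the greatest divisor of m not exceeding the start value s.
lemma pvGfLoop_spec (m : Int) (_hm : 1 ≤ m) :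
    ∀ s : Nat, 1 ≤ s →
      ∃ a : Nat, 1 ≤ a ∧ a ≤ s ∧ ((a : Int) ∣ m) ∧
        (∀ k : Nat, a < k → k ≤ s → ¬ ((k : Int) ∣ m)) ∧
        pvGfLoop m s = ((a : Int), PySem.Int.floordiv m (a : Int)) := by
  intro s
  induction s with
  | zero => omega
  | succ a ih =>
    intro _
    by_cases h : PySem.Int.mod m ((a : Int) + 1) = 0
    · refine ⟨a + 1, by omega, le_refl _, ?_, by omega, ?_⟩
      · rw [PySem.Int.mod_eq_zero_iff_dvd] at h; push_cast; exact h
      · simp only [pvGfLoop, if_pos h]; push_cast; rfl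
    · have hnd : ¬ (((a : Int) + 1) ∣ m) := fun hd => h ((PySem.Int.mod_eq_zero_iff_dvd m _).mpr hd)
      rcases Nat.eq_zero_or_pos a with ha0 | ha1
      · exfalso; apply hnd; rw [ha0]; simp
      · obtain ⟨b, hb1, hbs, hbd, hbmax, hbeq⟩ := ih ha1
        refine ⟨b, hb1, by omega, hbd, ?_, ?_⟩
        · intro k hk1 hk2
          rcases Nat.lt_or_ge k (a + 1) with hk | hk
          · exact hbmax k hk1 (by omega)
          · have : k = a + 1 := by omega
            subst this; push_cast; exact hnd
        · simp only [pvGfLoop, if_neg h]; exact hbeq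

-- the running max is an upper bound of every qualifying element and at least the seed
lemma pvBest_le (rem : Int) (l : List Int) (a0 : Int) :
    a0 ≤ l.foldl (fun a d => if PySem.Int.mod rem d = 0 ∧ d * d ≤ rem ∧ a < d then d else a) a0 ∧
    ∀ d ∈ l, PySem.Int.mod rem d = 0 → d * d ≤ rem →
      d ≤ l.foldl (fun a d => if PySem.Int.mod rem d = 0 ∧ d * d ≤ rem ∧ a < d then d else a) a0 := by
  induction l generalizing a0 with
  | nil => simp
  | cons d t ih =>
    simp only [List.foldl_cons]
    by_cases hc : PySem.Int.mod rem d = 0 ∧ d * d ≤ rem ∧ a0 < d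
    · rw [if_pos hc]
      refine ⟨le_trans (le_of_lt hc.2.2) (ih d).1, ?_⟩
      intro x hx hm hs
      rcases List.mem_cons.mp hx with hx | hx
      · subst hx; exact (ih x).1
      · exact (ih d).2 x hx hm hs
    · rw [if_neg hc]
      refine ⟨(ih a0).1, ?_⟩
      intro x hx hm hs
      rcases List.mem_cons.mp hx with hx | hx
      · subst hx
        have : x ≤ a0 := by
          by_contra hlt
          exact hc ⟨hm, hs, by omega⟩
        exact le_trans this (ih a0).1
      · exact (ih a0).2 x hx hm hs

-- the running max is the seed or a qualifying element of the list
lemma pvBest_mem (rem : Int) (l : List Int) (a0 : Int) :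
    l.foldl (fun a d => if PySem.Int.mod rem d = 0 ∧ d * d ≤ rem ∧ a < d then d else a) a0 = a0 ∨
    (l.foldl (fun a d => if PySem.Int.mod rem d = 0 ∧ d * d ≤ rem ∧ a < d then d else a) a0 ∈ l ∧
      PySem.Int.mod rem (l.foldl (fun a d => if PySem.Int.mod rem d = 0 ∧ d * d ≤ rem ∧ a < d then d else a) a0) = 0 ∧
      (l.foldl (fun a d => if PySem.Int.mod rem d = 0 ∧ d * d ≤ rem ∧ a < d then d else a) a0) *
        (l.foldl (fun a d => if PySem.Int.mod rem d = 0 ∧ d * d ≤ rem ∧ a < d then d else a) a0) ≤ rem) := by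
  induction l generalizing a0 with
  | nil => simp
  | cons d t ih =>
    simp only [List.foldl_cons]
    by_cases hc : PySem.Int.mod rem d = 0 ∧ d * d ≤ rem ∧ a0 < d
    · rw [if_pos hc]
      rcases ih d with h | ⟨hmem, hm, hs⟩
      · right; exact ⟨by rw [h]; exact List.mem_cons_self .., by rw [h]; exact hc.1, by rw [h]; exact hc.2.1⟩
      · right; exact ⟨List.mem_cons_of_mem d hmem, hm, hs⟩
    · rw [if_neg hc]
      rcases ih a0 with h | ⟨hmem, hm, hs⟩
      · left; exact h
      · right; exact ⟨List.mem_cons_of_mem d hmem, hm, hs⟩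

lemma pvDivs_eq_flatMap (n : Int) :
    pvDivs n = (PySem.List.pyRange 1 ((Nat.sqrt n.toNat : Int) + 1) 1).flatMap
      (fun d => if PySem.Int.mod n d = 0 then [d, PySem.Int.floordiv n d] else []) := by
  unfold pvDivs
  rw [show (fun (divs : List Int) (d : Int) =>
        if PySem.Int.mod n d = 0 then divs ++ [d, PySem.Int.floordiv n d] else divs) =
      (fun divs d => divs ++ (if PySem.Int.mod n d = 0 then [d, PySem.Int.floordiv n d] else []))
    from by funext acc x; split <;> simp]
  rw [PySem.List.foldl_append_eq_flatMap]
  simp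

lemma pvDivs_complete (n k : Int) (hn : 1 ≤ n) (hk : 1 ≤ k) (hdvd : k ∣ n) (hk2 : k * k ≤ n) :
    k ∈ pvDivs n := by
  rw [pvDivs_eq_flatMap]
  apply List.mem_flatMap.mpr
  refine ⟨k, ?_, ?_⟩
  · rw [PySem.List.mem_pyRange_one]
    refine ⟨hk, ?_⟩
    have hk' : ((k.toNat : Int)) = k := Int.toNat_of_nonneg (by omega)
    have hn' : ((n.toNat : Int)) = n := Int.toNat_of_nonneg (by omega)
    have hkk : k.toNat * k.toNat ≤ n.toNat := by
      have h2 := hk2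
      rw [← hk', ← hn'] at h2
      exact_mod_cast h2
    have hks : k.toNat ≤ Nat.sqrt n.toNat := by
      rw [Nat.le_sqrt', pow_two]; exact hkk
    omega
  · rw [if_pos ((PySem.Int.mod_eq_zero_iff_dvd n k).mpr hdvd)]
    exact List.mem_cons_self ..

-- per-step agreement: get_factors on a divisor `rem` of n picks exactly B's running max over pvDivs n
lemma step_eq (n rem : Int) (hn : 1 ≤ n) (hr : 1 ≤ rem) (hdvd : rem ∣ n) :
    get_factors rem = (pvBest rem (pvDivs n), PySem.Int.floordiv rem (pvBest rem (pvDivs n))) ∧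
    1 ≤ pvBest rem (pvDivs n) ∧ pvBest rem (pvDivs n) ∣ rem := by
  have hs : 1 ≤ Nat.sqrt rem.toNat := Nat.sqrt_pos.mpr (by omega)
  obtain ⟨a, ha1, has, had, hmax, heq⟩ := pvGfLoop_spec rem hr _ hs
  have hrem_n : rem ≤ n := Int.le_of_dvd (by omega) hdvd
  have hrInt : ((rem.toNat : Int)) = rem := Int.toNat_of_nonneg (by omega)
  have haa : (a : Int) * (a : Int) ≤ rem := by
    have h1 : a * a ≤ rem.toNat := by
      have h2 := Nat.sqrt_le' rem.toNat
      rw [pow_two] at h2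
      calc a * a ≤ Nat.sqrt rem.toNat * Nat.sqrt rem.toNat := Nat.mul_le_mul has has
        _ ≤ rem.toNat := h2
    rw [← hrInt]
    exact_mod_cast h1
  have hadn : (a : Int) ∣ n := dvd_trans had hdvd
  have hamem : (a : Int) ∈ pvDivs n := pvDivs_complete n a hn (by exact_mod_cast ha1) hadn (by omega)
  have hble := pvBest_le rem (pvDivs n) 1
  have hb1 : 1 ≤ pvBest rem (pvDivs n) := hble.1
  have hab : (a : Int) ≤ pvBest rem (pvDivs n) :=
    hble.2 a hamem ((PySem.Int.mod_eq_zero_iff_dvd rem a).mpr had) haa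
  have hba : pvBest rem (pvDivs n) ≤ (a : Int) := by
    rcases pvBest_mem rem (pvDivs n) 1 with h | ⟨hmem, hm, hsq⟩
    · have hbe : pvBest rem (pvDivs n) = 1 := h
      omega
    · have hbpos : 1 ≤ pvBest rem (pvDivs n) := hb1
      have hbdvd : pvBest rem (pvDivs n) ∣ rem := (PySem.Int.mod_eq_zero_iff_dvd rem _).mp hm
      have hbInt : (((pvBest rem (pvDivs n)).toNat : Int)) = pvBest rem (pvDivs n) :=
        Int.toNat_of_nonneg (by omega)
      have hbs : (pvBest rem (pvDivs n)).toNat ≤ Nat.sqrt rem.toNat := by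
        have hq : (pvBest rem (pvDivs n)).toNat * (pvBest rem (pvDivs n)).toNat ≤ rem.toNat := by
          have h2 : pvBest rem (pvDivs n) * pvBest rem (pvDivs n) ≤ rem := hsq
          have h3 : (((pvBest rem (pvDivs n)).toNat * (pvBest rem (pvDivs n)).toNat : Nat) : Int) ≤ ((rem.toNat : Nat) : Int) := by
            push_cast
            rw [hbInt, hrInt]
            exact h2
          exact_mod_cast h3
        rw [Nat.le_sqrt', pow_two]; exact hq
      by_contra hlt
      have hk : a < (pvBest rem (pvDivs n)).toNat := by omega
      apply hmax (pvBest rem (pvDivs n)).toNat hk hbs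
      rwa [Int.toNat_of_nonneg (by omega)]
  have hba' : pvBest rem (pvDivs n) = (a : Int) := le_antisymm hba hab
  have hgf : get_factors rem = ((a : Int), PySem.Int.floordiv rem (a : Int)) := by
    rw [get_factors, if_neg (by omega)]; exact heq
  rw [hba']
  exact ⟨hgf, by omega, had⟩

lemma pvProd_append (xs : List Int) (x : Int) : pvProd (xs ++ [x]) = pvProd xs * x := by
  unfold pvProd
  rw [List.foldl_append]
  simp

lemma loops_eq (n : Int) (hn : 1 ≤ n) :
    ∀ (k : Nat) (modes : List Int) (rem : Int), 1 ≤ rem → rem ∣ n →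
      (pvALoop modes rem k).1 ++ [(pvALoop modes rem k).2] = pvBLoop (pvDivs n) modes rem k ∧
      pvProd ((pvALoop modes rem k).1 ++ [(pvALoop modes rem k).2]) = pvProd modes * rem := by
  intro k
  induction k with
  | zero =>
    intro modes rem _ _
    simp [pvALoop, pvBLoop, pvProd_append]
  | succ k ih =>
    intro modes rem hr hdvd
    obtain ⟨heq, hb1, hbd⟩ := step_eq n rem hn hr hdvd
    have hfd : PySem.Int.floordiv rem (pvBest rem (pvDivs n)) = rem / pvBest rem (pvDivs n) :=
      PySem.Int.floordiv_eq_ediv_of_pos (by omega)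
    have hmul : pvBest rem (pvDivs n) * (rem / pvBest rem (pvDivs n)) = rem :=
      Int.mul_ediv_cancel' hbd
    have hr' : 1 ≤ rem / pvBest rem (pvDivs n) := by nlinarith [hmul, hb1, hr]
    have hd' : rem / pvBest rem (pvDivs n) ∣ n :=
      dvd_trans (Dvd.intro _ (by rw [mul_comm]; exact hmul)) hdvd
    simp only [pvALoop, pvBLoop, heq]
    rw [hfd]
    obtain ⟨ih1, ih2⟩ := ih (modes ++ [pvBest rem (pvDivs n)]) (rem / pvBest rem (pvDivs n)) hr' hd'
    refine ⟨ih1, ?_⟩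
    rw [ih2, pvProd_append, mul_assoc, hmul]

-- ===== VERDICT (by name: the statement is the Claim_ definition above) =====
theorem factorize_into_modes_spec : Claim_equal_factorize_into_modes := by
  intro n num_modes _ hpre
  obtain ⟨hn, hm⟩ := hpre
  unfold Spec_factorize_into_modes factorize_into_modes factorize_into_modes_alt
  rw [if_neg (show ¬ n ≤ 0 by omega), if_neg (show ¬ num_modes ≤ 0 by omega),
    if_neg (show ¬ n ≤ 0 by omega), if_neg (show ¬ num_modes ≤ 0 by omega)]
  by_cases h1 : num_modes = 1
  · rw [if_pos h1, h1]
    norm_num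
    simp [pvBLoop]
  · rw [if_neg h1]
    obtain ⟨hlist, hprod⟩ := loops_eq n hn (num_modes - 1).toNat [] n hn dvd_rfl
    have hguard : pvProd ((pvALoop [] n (num_modes - 1).toNat).1 ++ [(pvALoop [] n (num_modes - 1).toNat).2]) = n := by
      rw [hprod]; simp [pvProd]
    simp only [hguard]
    rw [if_neg (by omega)]
    exact hlist
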